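-- pv_equiv track=rewrite | github.com/toprednax/PenO3-Kali | WPA2/AESRijndael-Inverse.py | summate
-- ===== SOURCE A (Python) =====
-- def makeEqualLengthBehind(polynomials):
-- 	length = 0
--
-- 	for i in polynomials:
-- 		if len(i) > length:
-- 			length = len(i)
--
-- 	# Add zeros at the back until its as long as the longest polynomial
-- 	for i in range(len(polynomials)):
-- 		while len(polynomials[i]) != length:
-- 			polynomials[i] += '0'
--
-- 	return polynomials, length
--
-- def summate(polynomials, l = 0):
-- 	polynomial = ''
--
-- 	if l == 0:
-- 		polynomials, l = makeEqualLengthBehind(polynomials)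
--
-- 	for i in range(l):
-- 		count = 0
--
-- 		for j in range(len(polynomials)):
-- 			if polynomials[j][i] == '1':
-- 				count += 1
--
-- 		polynomial += str((count % 2))
--
--
-- 	return stripZeroInFront(polynomial)
--
-- def stripZeroInFront(p):
-- 	poly = ''
--
-- 	for i in range(len(p)):
-- 		if p[i] != '0':
-- 			return poly if len(poly) != 0 else p
--
-- 		poly = p[i+1:]
-- ===== SOURCE B (Python) =====
-- # B: row-wise single pass XOR into a boolean column accumulator, then one lstrip;
-- # replaces A's column-by-column double loop with repeated indexing.
-- # Note: unlike A, B does not mutate `polynomials` (A pads it in place when l == 0);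
-- # equivalence is about the return value only.
-- def summate(polynomials, l=0):
--     width = max(map(len, polynomials), default=0) if l == 0 else max(l, 0)
--     acc = [False] * width
--     for p in polynomials:
--         for i, c in enumerate(p[:width]):
--             acc[i] ^= (c == '1')
--     s = ''.join('1' if b else '0' for b in acc).lstrip('0')
--     return s or None
-- ===== Notes on version B (the rewrite author's own statement) =====
-- stated objective: simpler
-- what changed: A builds the parity string column by column with a nested loop that re-indexes every string per column (after an in-place while-loop padding pass); B makes one row-wise pass XOR-ing each string into a boolean column accumulator and then strips leading zeros with a single lstrip; B does not mutate the input list (A right-pads it in place when l == 0).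
import Mathlib
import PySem

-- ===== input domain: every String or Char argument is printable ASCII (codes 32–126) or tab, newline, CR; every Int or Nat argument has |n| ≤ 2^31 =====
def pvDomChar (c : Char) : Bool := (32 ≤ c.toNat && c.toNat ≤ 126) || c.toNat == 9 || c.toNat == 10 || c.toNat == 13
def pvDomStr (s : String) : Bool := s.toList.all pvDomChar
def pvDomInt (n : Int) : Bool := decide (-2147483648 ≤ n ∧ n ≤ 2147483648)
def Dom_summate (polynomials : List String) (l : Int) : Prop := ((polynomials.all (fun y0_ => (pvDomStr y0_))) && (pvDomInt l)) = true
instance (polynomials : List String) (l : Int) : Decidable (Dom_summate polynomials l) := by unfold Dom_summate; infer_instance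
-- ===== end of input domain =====

-- B replaces A's column-by-column double loop (with repeated string indexing) by one
-- row-wise pass XOR-ing each string into a boolean column accumulator, then a single
-- lstrip; objective: simpler.  A mutates `polynomials` in place (right-pads it with '0'
-- when l == 0); B does not — the equivalence proved here is about the return value only.

-- ===== PORT A =====
-- while len(polynomials[i]) != length: polynomials[i] += '0'
-- ('<' instead of '≠' is only a totality guard: the caller always passes length ≥ len(s))
def padWhileL (length : Nat) (s : List Char) : List Char :=
  if s.length < length then padWhileL length (s ++ ['0']) else s
termination_by length - s.length
decreasing_by simp [List.length_append]; omega

def makeEqualLengthBehind (polynomials : List String) : List String × Int :=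
  let length := polynomials.foldl (fun L i => if i.toList.length > L then i.toList.length else L) 0
  (polynomials.map (fun p => String.ofList (padWhileL length p.toList)), (length : Int))

-- the for-loop of stripZeroInFront: state (poly, i)
def stripGo (p : List Char) (poly : List Char) (i : Nat) : Option (List Char) :=
  if h : i < p.length then
    if p[i] ≠ '0' then some (if poly.length ≠ 0 then poly else p)
    else stripGo p (p.drop (i + 1)) (i + 1)
  else none
termination_by p.length - i

def stripZeroInFront (p : List Char) : Option String :=
  (stripGo p [] 0).map String.ofList

-- the inner loop: count = 0; for j in range(len(polynomials)): if polynomials[j][i] == '1': count += 1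
def countA (polys : List String) (i : Int) : Int :=
  (PySem.List.pyRange 0 (polys.length : Int) 1).foldl (fun count j =>
      if PySem.Str.pyGet? (PySem.List.pyGetD polys j "") i = some '1' then count + 1
      else count) 0

def summate (polynomials : List String) (l : Int) : Option String :=
  let pl := if l == 0 then makeEqualLengthBehind polynomials else (polynomials, l)
  let polys := pl.1
  let polynomial := (PySem.List.pyRange 0 pl.2 1).foldl (fun poly i =>
      poly ++ (PySem.Int.toStr (PySem.Int.mod (countA polys i) 2)).toList) []
  stripZeroInFront polynomial

-- ===== PORT B =====
def summate_alt (polynomials : List String) (l : Int) : Option String :=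
  let width : Nat :=
    if l == 0 then (polynomials.map (fun p => p.toList.length)).foldl max 0 else l.toNat
  let acc : List Bool := polynomials.foldl (fun acc p =>
      (p.toList.take width).zipIdx.foldl (fun acc ci =>
          acc.set ci.2 (acc.getD ci.2 false ^^ (ci.1 == '1'))) acc)
    (List.replicate width false)
  let s := (acc.map (fun b => if b then '1' else '0')).dropWhile (· == '0')
  if s.isEmpty then none else some (String.ofList s)

-- ===== PRECONDITION & SPEC =====
-- Pre_ excludes only the inputs where A raises IndexError: l > 0 with some string shorter than l.
def Pre_summate (polynomials : List String) (l : Int) : Prop :=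
  0 < l → ∀ p ∈ polynomials, l ≤ (p.toList.length : Int)
instance (polynomials : List String) (l : Int) : Decidable (Pre_summate polynomials l) := by
  unfold Pre_summate; infer_instance

def pvWitness_summate : List String × Int := (["101", "11"], 0)

def Spec_summate (polynomials : List String) (l : Int) (out : Option String) : Prop :=
  out = summate_alt polynomials l
instance (polynomials : List String) (l : Int) (out : Option String) : Decidable (Spec_summate polynomials l out) := by unfold Spec_summate; infer_instance

-- ===== CLAIM (what is proved, stated in full; the proofs are below) =====
def Claim_equal_summate : Prop := ∀ (polynomials : List String) (l : Int), Dom_summate polynomials l → Pre_summate polynomials l → Spec_summate polynomials l (summate polynomials l)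


-- ===== LEMMAS AND PROOFS =====

-- bit of row p at column i ('0'-padded beyond the end)
def bitOf (p : String) (i : Nat) : Bool := p.toList.getD i '0' == '1'
-- parity of column i over all rows
def colPar (ps : List String) (i : Nat) : Bool := ps.foldl (fun b p => b ^^ bitOf p i) false

theorem foldl_xor_shift {α : Type} (f : α → Bool) (ps : List α) (b : Bool) :
    ps.foldl (fun b p => b ^^ f p) b = (b ^^ ps.foldl (fun b p => b ^^ f p) false) := by
  induction ps generalizing b with
  | nil => simp
  | cons p ps ih =>
      simp only [List.foldl_cons]
      rw [ih (b ^^ f p), ih (false ^^ f p)]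
      cases b <;> cases f p <;> simp

theorem padWhileL_eq (n : Nat) (s : List Char) (h : s.length ≤ n) :
    padWhileL n s = s ++ List.replicate (n - s.length) '0' := by
  by_cases hlt : s.length < n
  · rw [padWhileL]
    simp only [hlt, if_true]
    rw [padWhileL_eq n (s ++ ['0']) (by simp; omega)]
    simp only [List.length_append, List.length_singleton, List.append_assoc]
    congr 1
    have : n - s.length = (n - (s.length + 1)) + 1 := by omega
    rw [this, List.replicate_succ]
    simp
  · have : s.length = n := by omega
    rw [padWhileL]
    simp [hlt, this]
termination_by n - s.length
decreasing_by simp; omega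

theorem strip_aux (p : List Char) (i : Nat) :
    stripGo p (p.drop i) i =
      (if (p.drop i).dropWhile (· == '0') = [] then none
       else some ((p.drop i).dropWhile (· == '0'))) := by
  rw [stripGo]
  by_cases h : i < p.length
  · have hd : p.drop i = p[i] :: p.drop (i + 1) := List.drop_eq_getElem_cons h
    by_cases hz : p[i] = '0'
    · simp only [h, dif_pos, hz, ne_eq, not_true_eq_false, if_false]
      rw [strip_aux p (i + 1), hd]
      simp only [List.dropWhile_cons, hz]
      simp only [beq_self_eq_true, if_true]
    · have hdw : (p.drop i).dropWhile (· == '0') = p.drop i := by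
        rw [hd, List.dropWhile_cons]; simp [hz]
      have hlen : (p.drop i).length ≠ 0 := by simp; omega
      have hne : p.drop i ≠ [] := by
        intro hc; rw [hc] at hlen; exact hlen rfl
      simp only [h, dif_pos, hz, ne_eq, not_false_eq_true, if_true, hdw, hlen, hne,
        if_false, if_true]
  · have : p.drop i = [] := List.drop_eq_nil_of_le (by omega)
    simp [h, this]
termination_by p.length - i

theorem strip_eq (p : List Char) :
    stripGo p [] 0 =
      (if p.dropWhile (· == '0') = [] then none else some (p.dropWhile (· == '0'))) := by
  cases p with
  | nil => rw [stripGo]; simp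
  | cons c t =>
      rw [stripGo]
      by_cases hz : c = '0'
      · subst hz
        have h1 := strip_aux ('0' :: t) 1
        simp only [List.drop_succ_cons, List.drop_zero] at h1
        simp only [List.length_cons, Nat.zero_lt_succ, dif_pos, List.getElem_cons_zero,
          ne_eq, not_true_eq_false, if_false, Nat.zero_add, List.drop_succ_cons,
          List.drop_zero, h1]
        simp
      · simp only [List.length_cons, Nat.zero_lt_succ, dif_pos, List.getElem_cons_zero,
          ne_eq, hz, not_false_eq_true, if_true, List.dropWhile_cons]
        simp [hz]

-- row update: pointwise effect of the inner zipIdx fold of B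
theorem row_getD (cs : List Char) (k : Nat) (acc : List Bool) (h : k + cs.length ≤ acc.length) :
    ∀ i, ((cs.zipIdx k).foldl (fun acc ci =>
        acc.set ci.2 (acc.getD ci.2 false ^^ (ci.1 == '1'))) acc).getD i false
      = (acc.getD i false ^^ (decide (k ≤ i) && (cs.getD (i - k) '0' == '1'))) := by
  induction cs generalizing k acc with
  | nil => intro i; simp
  | cons c t ih =>
      intro i
      rw [List.zipIdx_cons, List.foldl_cons]
      have hk : k < acc.length := by simp at h; omega
      have hlen' : (k + 1) + t.length ≤ (acc.set k (acc.getD k false ^^ (c == '1'))).length := by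
        simp at h ⊢; omega
      rw [ih (k + 1) _ hlen' i]
      have hset : (acc.set k (acc.getD k false ^^ (c == '1'))).getD i false
          = if k = i then (acc.getD k false ^^ (c == '1')) else acc.getD i false := by
        rw [List.getD_eq_getElem?_getD, List.getElem?_set]
        by_cases hik : k = i
        · subst hik; simp [hk, List.getD_eq_getElem?_getD]
        · simp [hik, List.getD_eq_getElem?_getD]
      rw [hset]
      by_cases hik : k = i
      · subst hik
        have h1 : ¬ (k + 1 ≤ k) := by omega
        simp [h1, Nat.sub_self]
      · by_cases hlt : k ≤ i
        · have hlt' : k + 1 ≤ i := by omega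
          have hsub : i - k = (i - (k + 1)) + 1 := by omega
          simp only [hik, if_false, hlt, hlt', decide_true, Bool.true_and, hsub,
            List.getD_cons_succ]
        · have h1 : ¬ (k + 1 ≤ i) := by omega
          simp [hik, hlt, h1]

theorem row_length (cs : List Char) (k : Nat) (acc : List Bool) :
    ((cs.zipIdx k).foldl (fun acc ci =>
        acc.set ci.2 (acc.getD ci.2 false ^^ (ci.1 == '1'))) acc).length = acc.length := by
  induction cs generalizing k acc with
  | nil => simp
  | cons c t ih =>
      rw [List.zipIdx_cons, List.foldl_cons, ih]
      simp

-- final accumulator of B, pointwise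
theorem acc_getD (w : Nat) (ps : List String) (acc : List Bool) (hlen : acc.length = w) :
    ∀ i, (ps.foldl (fun acc p =>
        (p.toList.take w).zipIdx.foldl (fun acc ci =>
          acc.set ci.2 (acc.getD ci.2 false ^^ (ci.1 == '1'))) acc) acc).getD i false
      = (acc.getD i false ^^ ps.foldl (fun b p => b ^^ ((p.toList.take w).getD i '0' == '1')) false) := by
  induction ps generalizing acc with
  | nil => intro i; simp
  | cons p t ih =>
      intro i
      simp only [List.foldl_cons]
      have hrow : (0 : Nat) + (p.toList.take w).length ≤ acc.length := by
        simp [hlen]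
      have hlen2 : ((p.toList.take w).zipIdx.foldl (fun acc ci =>
          acc.set ci.2 (acc.getD ci.2 false ^^ (ci.1 == '1'))) acc).length = w := by
        rw [row_length]; exact hlen
      rw [ih _ hlen2 i, row_getD (p.toList.take w) 0 acc hrow i]
      rw [foldl_xor_shift (fun q => ((q.toList.take w).getD i '0' == '1')) t
        (false ^^ ((p.toList.take w).getD i '0' == '1'))]
      simp [Bool.xor_assoc]

theorem acc_length (w : Nat) (ps : List String) (acc : List Bool) :
    (ps.foldl (fun acc p =>
        (p.toList.take w).zipIdx.foldl (fun acc ci =>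
          acc.set ci.2 (acc.getD ci.2 false ^^ (ci.1 == '1'))) acc) acc).length = acc.length := by
  induction ps generalizing acc with
  | nil => simp
  | cons p t ih =>
      simp only [List.foldl_cons]
      rw [ih, row_length]

theorem take_bit (w i : Nat) (hi : i < w) (p : String) :
    ((p.toList.take w).getD i '0' == '1') = bitOf p i := by
  unfold bitOf
  congr 1
  rw [List.getD_eq_getElem?_getD, List.getD_eq_getElem?_getD, List.getElem?_take]
  simp [hi]

-- B's accumulator as an explicit column map
theorem acc_eq (w : Nat) (ps : List String) :
    ps.foldl (fun acc p =>
        (p.toList.take w).zipIdx.foldl (fun acc ci =>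
          acc.set ci.2 (acc.getD ci.2 false ^^ (ci.1 == '1'))) acc) (List.replicate w false)
      = (List.range w).map (fun i => colPar ps i) := by
  apply List.ext_getElem
  · rw [acc_length]; simp
  · intro i h1 h2
    have hiw : i < w := by rw [acc_length] at h1; simpa using h1
    rw [← List.getD_eq_getElem _ false h1]
    rw [acc_getD w ps (List.replicate w false) (by simp) i]
    have hrep : (List.replicate w false).getD i false = false := by
      rw [List.getD_eq_getElem?_getD]; simp [hiw]
    rw [hrep]
    have hfun : (fun (b : Bool) (p : String) => b ^^ ((p.toList.take w).getD i '0' == '1'))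
        = fun (b : Bool) (p : String) => b ^^ bitOf p i := by
      funext b q; rw [take_bit w i hiw]
    simp only [Bool.false_xor, hfun]
    simp [colPar]

-- parity of a 0/1 count
theorem countP_parity {α : Type} (P : α → Bool) (ps : List α) :
    ps.foldl (fun b p => b ^^ P p) false = decide (ps.countP P % 2 = 1) := by
  induction ps with
  | nil => simp
  | cons p t ih =>
      simp only [List.foldl_cons, List.countP_cons]
      rw [foldl_xor_shift, ih]
      cases hP : P p
      · simp
      · simp only [Bool.true_xor]
        rcases Nat.mod_two_eq_zero_or_one (t.countP P) with h | h <;>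
          simp [Nat.add_mod, h]

theorem count_foldl_eq {α : Type} (P : α → Prop) [DecidablePred P] (ps : List α) (c : Int) :
    ps.foldl (fun count p => if P p then count + 1 else count) c
      = c + ((ps.countP (fun p => decide (P p)) : Nat) : Int) := by
  induction ps generalizing c with
  | nil => simp
  | cons p t ih =>
      simp only [List.foldl_cons, List.countP_cons]
      by_cases hP : P p
      · simp only [hP, if_true, decide_true, if_pos, ih]
        push_cast
        ring
      · simp only [hP, if_false, decide_false, if_neg, ih]
        simp [hP]

theorem toStr_mod_two (n : Nat) :
    (PySem.Int.toStr (PySem.Int.mod (n : Int) 2)).toList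
      = [if decide (n % 2 = 1) then '1' else '0'] := by
  have h2 : ((2:Nat) : Int) = (2 : Int) := by norm_num
  have := PySem.Int.mod_natCast n 2
  rw [h2] at this
  rw [this]
  rcases Nat.mod_two_eq_zero_or_one n with h | h <;> simp [h] <;> decide

-- the max computed by A's fold equals B's
theorem maxlen_eq (ps : List String) (b : Nat) :
    ps.foldl (fun L i => if i.toList.length > L then i.toList.length else L) b
      = (ps.map (fun p => p.toList.length)).foldl max b := by
  induction ps generalizing b with
  | nil => simp
  | cons p t ih =>
      simp only [List.foldl_cons, List.map_cons]
      rw [ih]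
      congr 1
      rw [Nat.max_def]
      split <;> split <;> omega

theorem le_maxlen (ps : List String) (p : String) (hp : p ∈ ps) :
    p.toList.length ≤ (ps.map (fun q => q.toList.length)).foldl max 0 := by
  have := (PySem.List.le_foldl_max ((ps.map (fun q => q.toList.length))) 0).2
  exact this _ (List.mem_map_of_mem hp)

-- A's column string, as a map over columns
theorem countA_eq (polys : List String) (i : Int) :
    countA polys i
      = ((polys.countP (fun p => decide (PySem.Str.pyGet? p i = some '1')) : Nat) : Int) := by
  unfold countA
  rw [PySem.List.foldl_pyRange_zero_pyGetD' polys ""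
    (fun (count : Int) (p : String) =>
      if PySem.Str.pyGet? p i = some '1' then count + 1 else count) 0]
  rw [count_foldl_eq]
  simp

theorem flatMap_eq_map_of {l : List Nat} {g : Nat → List Char} {c : Nat → Char}
    (h : ∀ k ∈ l, g k = [c k]) : l.flatMap g = l.map c := by
  induction l with
  | nil => simp
  | cons a t ih =>
      simp only [List.flatMap_cons, List.map_cons]
      rw [h a (by simp), ih (fun k hk => h k (by simp [hk]))]
      rfl

theorem polyA_eq (polys : List String) (l' : Int) (w : Nat) (hw : w = l'.toNat)
    (hchar : ∀ i : Nat, i < w → ∀ p ∈ polys,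
      decide (PySem.Str.pyGet? p ((0 : Int) + (i : Int)) = some '1') = bitOf p i) :
    ((PySem.List.pyRange 0 l' 1).foldl (fun poly i =>
        poly ++ (PySem.Int.toStr (PySem.Int.mod (countA polys i) 2)).toList) [])
      = (List.range w).map (fun i => if colPar polys i then '1' else '0') := by
  rw [PySem.List.foldl_append_eq_flatMap, PySem.List.pyRange_one, List.nil_append]
  have hsub : (l' - 0).toNat = w := by omega
  rw [hsub, List.flatMap_map]
  apply flatMap_eq_map_of
  intro k hk
  have hkw : k < w := List.mem_range.mp hk
  show (PySem.Int.toStr (PySem.Int.mod (countA polys ((0 : Int) + (k : Int))) 2)).toList = _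
  rw [countA_eq, toStr_mod_two]
  have hcnt : polys.countP (fun p => decide (PySem.Str.pyGet? p ((0 : Int) + (k : Int)) = some '1'))
      = polys.countP (fun p => bitOf p k) :=
    List.countP_congr (fun p hp => by rw [hchar k hkw p hp])
  rw [hcnt]
  have := countP_parity (fun p => bitOf p k) polys
  rw [colPar, ← this]

-- if-then-else form of both final answers
def outOf (L : List Char) : Option String :=
  if L.dropWhile (· == '0') = [] then none else some (String.ofList (L.dropWhile (· == '0')))

theorem stripZero_outOf (L : List Char) : stripZeroInFront L = outOf L := by
  unfold stripZeroInFront outOf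
  rw [strip_eq]
  by_cases h : L.dropWhile (· == '0') = [] <;> simp [h]

theorem alt_eq (ps : List String) (l : Int) :
    summate_alt ps l
      = outOf ((List.range (if l == 0 then (ps.map (fun p => p.toList.length)).foldl max 0
          else l.toNat)).map (fun i => if colPar ps i then '1' else '0')) := by
  simp only [summate_alt, outOf]
  rw [acc_eq, List.map_map]
  have : ((fun b => if b = true then '1' else '0') ∘ fun i => colPar ps i)
      = fun i => if colPar ps i then '1' else '0' := rfl
  rw [this]
  by_cases h : (List.map (fun i => if colPar ps i then '1' else '0')
      (List.range (if l == 0 then (ps.map (fun p => p.toList.length)).foldl max 0 else l.toNat))).dropWhile (· == '0') = [] <;>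
    simp [h, List.isEmpty_iff]

theorem getD_pad (cs : List Char) (M i : Nat) :
    (cs ++ List.replicate (M - cs.length) '0').getD i '0' = cs.getD i '0' := by
  rw [List.getD_eq_getElem?_getD, List.getD_eq_getElem?_getD, List.getElem?_append]
  by_cases h : i < cs.length
  · simp [h]
  · simp only [h, if_neg, if_false, List.getElem?_replicate]
    rw [List.getElem?_eq_none (by omega)]
    by_cases h2 : i - cs.length < M - cs.length <;> simp [h2]

-- decide (s[i] == '1') is bitOf whenever i is in range
theorem char_bit (p : String) (i : Nat) (h : i < p.toList.length) :
    decide (PySem.Str.pyGet? p ((0 : Int) + (i : Int)) = some '1') = bitOf p i := by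
  have h0 : ((0 : Int) + (i : Int)) = ((i : Nat) : Int) := by omega
  rw [h0, PySem.Str.pyGet?_natCast, bitOf,
    List.getElem?_eq_getElem h, List.getD_eq_getElem _ '0' h]
  by_cases hc : p.toList[i] = '1'
  · simp [hc]
  · simp [hc, beq_eq_false_iff_ne]

-- ===== VERDICT (by name: the statement is the Claim_ definition above) =====
theorem foldl_congr_mem' {α β : Type} (l : List α) (f g : β → α → β) (b : β)
    (h : ∀ x ∈ l, ∀ acc, f acc x = g acc x) : l.foldl f b = l.foldl g b := by
  induction l generalizing b with
  | nil => rfl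
  | cons a t ih =>
      simp only [List.foldl_cons]
      rw [h a (by simp) b]
      exact ih _ (fun x hx acc => h x (by simp [hx]) acc)

theorem summate_spec : Claim_equal_summate := by
  intro ps l _ hpre
  unfold Spec_summate
  rw [alt_eq]
  by_cases hl : l = 0
  · subst hl
    have hb : ((0 : Int) == 0) = true := by decide
    simp only [summate, makeEqualLengthBehind, hb, if_true]
    rw [maxlen_eq ps 0]
    set M0 := (ps.map (fun p => p.toList.length)).foldl max 0 with hM0
    have hlenpad : ∀ p ∈ ps, (padWhileL M0 p.toList).length = M0 := by
      intro p hp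
      have hle : p.toList.length ≤ M0 := le_maxlen ps p hp
      rw [padWhileL_eq M0 p.toList hle, List.length_append, List.length_replicate]
      omega
    have hpad : ∀ p ∈ ps, padWhileL M0 p.toList
        = p.toList ++ List.replicate (M0 - p.toList.length) '0' := by
      intro p hp
      exact padWhileL_eq M0 p.toList (le_maxlen ps p hp)
    rw [stripZero_outOf, polyA_eq (ps.map (fun p => String.ofList (padWhileL M0 p.toList)))
      ((M0 : Nat) : Int) M0 (by simp)
      (by
        intro i hi q hq
        obtain ⟨p, hp, rfl⟩ := List.mem_map.mp hq
        apply char_bit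
        simp [hlenpad p hp, hi])]
    have hcol : ∀ i, colPar (ps.map (fun p => String.ofList (padWhileL M0 p.toList))) i
        = colPar ps i := by
      intro i
      rw [colPar, List.foldl_map, colPar]
      apply foldl_congr_mem'
      intro p hp acc
      rw [bitOf, bitOf]
      simp only [String.toList_ofList, hpad p hp, getD_pad]
    have hfun : (fun i => if colPar (ps.map (fun p => String.ofList (padWhileL M0 p.toList))) i
          then '1' else '0') = (fun i => if colPar ps i then '1' else '0') := by
      funext i; rw [hcol]
    rw [hfun]
  · have hb : (l == 0) = false := by simp [hl]
    simp only [summate, hb, Bool.false_eq_true, if_false]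
    rw [stripZero_outOf, polyA_eq ps l l.toNat rfl
      (by
        intro i hi p hp
        apply char_bit
        have hl0 : (0 : Int) < l := by omega
        have := hpre hl0 p hp
        omega)]
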